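-- pv_equiv track=rewrite | github.com/pierrealexandreguillemin-a11y/pocket_arbiter | scripts/archive/evaluation/annales/parse_annales.py | _infer_uv_from_question_count
-- ===== SOURCE A (Python) =====
-- def _infer_uv_from_question_count(
--     n_questions: int,
--     existing_uvs: set[str],
-- ) -> str | None:
--     """
--     Infer UV type from number of questions (heuristic).
--
--     Args:
--         n_questions: Number of questions in the correction table.
--         existing_uvs: Set of UVs already assigned.
--
--     Returns:
--         Inferred UV type or None if cannot determine.
--     """
--     if n_questions >= 25 and n_questions <= 35:
--         # Could be UVR, UVC, or UVT (typically ~30 questions each)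
--         for uv in ["UVR", "UVC", "UVT"]:
--             if uv not in existing_uvs:
--                 return uv
--     elif n_questions >= 15 and n_questions <= 25:
--         # Could be UVO (~20 questions) or smaller UVR/UVC
--         for uv in ["UVO", "UVR", "UVC"]:
--             if uv not in existing_uvs:
--                 return uv
--     elif n_questions >= 5 and n_questions <= 15:
--         # Smaller correction set - assign to first available UV
--         for uv in ["UVR", "UVC", "UVO", "UVT"]:
--             if uv not in existing_uvs:
--                 return uv
--     return None
-- ===== SOURCE B (Python) =====
-- # Bracket picked by closed-form arithmetic, then the unassigned UV of minimal rank.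
-- _RANKS = [
--     {"UVR": 0, "UVC": 1, "UVO": 2, "UVT": 3},   # 5-14 questions
--     {"UVO": 0, "UVR": 1, "UVC": 2},             # 15-24 questions
--     {"UVR": 0, "UVC": 1, "UVT": 2},             # 25-35 questions
-- ]
--
--
-- def _infer_uv_from_question_count(n_questions, existing_uvs):
--     if not 5 <= n_questions <= 35:
--         return None
--     ranks = _RANKS[min((n_questions - 5) // 10, 2)]
--     free = [uv for uv in ranks if uv not in existing_uvs]
--     return min(free, key=ranks.get, default=None)
-- ===== Notes on version B (the rewrite author's own statement) =====
-- stated objective: alternative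
-- what changed: Replaces the if-elif chain of early-return candidate loops by a closed-form bracket index (min((n-5)//10, 2)) into a list of rank dictionaries, then returns the unassigned UV of minimal rank via min(..., key=ranks.get, default=None) over a filtered list.
import Mathlib
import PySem

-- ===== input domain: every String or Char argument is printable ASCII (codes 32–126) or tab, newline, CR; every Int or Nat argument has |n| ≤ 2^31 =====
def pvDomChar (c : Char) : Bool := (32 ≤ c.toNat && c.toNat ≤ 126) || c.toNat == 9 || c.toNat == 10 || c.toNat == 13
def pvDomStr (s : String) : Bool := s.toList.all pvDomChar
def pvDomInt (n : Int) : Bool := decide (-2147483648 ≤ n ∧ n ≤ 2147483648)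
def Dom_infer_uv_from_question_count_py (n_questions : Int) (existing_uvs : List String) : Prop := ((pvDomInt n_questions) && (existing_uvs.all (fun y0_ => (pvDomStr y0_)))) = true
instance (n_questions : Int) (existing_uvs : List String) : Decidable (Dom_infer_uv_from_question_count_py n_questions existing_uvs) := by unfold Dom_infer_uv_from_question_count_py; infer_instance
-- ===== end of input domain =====

-- B selects the bracket by closed-form arithmetic (min((n-5)//10, 2)) and picks the
-- unassigned UV of minimal rank from a rank table (objective: alternative); same value everywhere.

-- ===== PORT A =====
-- the 'for uv in [...]: if uv not in existing_uvs: return uv' loop of each branch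
def pvLoopA (cands : List String) (existing_uvs : List String) : Option String :=
  match cands with
  | [] => none
  | uv :: rest => if uv ∈ existing_uvs then pvLoopA rest existing_uvs else some uv

def infer_uv_from_question_count_py (n_questions : Int) (existing_uvs : List String) : Option String :=
  if 25 ≤ n_questions ∧ n_questions ≤ 35 then
    pvLoopA ["UVR", "UVC", "UVT"] existing_uvs
  else if 15 ≤ n_questions ∧ n_questions ≤ 25 then
    pvLoopA ["UVO", "UVR", "UVC"] existing_uvs
  else if 5 ≤ n_questions ∧ n_questions ≤ 15 then
    pvLoopA ["UVR", "UVC", "UVO", "UVT"] existing_uvs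
  else none

-- ===== PORT B =====
-- _RANKS: one rank dict per bracket
def pvRanks : List (PySem.Dict String Int) :=
  [PySem.Dict.ofList [("UVR", 0), ("UVC", 1), ("UVO", 2), ("UVT", 3)],
   PySem.Dict.ofList [("UVO", 0), ("UVR", 1), ("UVC", 2)],
   PySem.Dict.ofList [("UVR", 0), ("UVC", 1), ("UVT", 2)]]

def infer_uv_from_question_count_py_alt (n_questions : Int) (existing_uvs : List String) : Option String :=
  if ¬ (5 ≤ n_questions ∧ n_questions ≤ 35) then none
  else
    -- _RANKS[min((n_questions - 5) // 10, 2)] — index always in range, pyGet? never none here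
    match PySem.List.pyGet? pvRanks (min (PySem.Int.floordiv (n_questions - 5) 10) 2) with
    | none => none
    | some ranks =>
        -- free = [uv for uv in ranks if uv not in existing_uvs]
        let free := (PySem.Dict.keys ranks).filter (fun uv => !existing_uvs.contains uv)
        -- min(free, key=ranks.get, default=None); every key of free is in ranks, getD exact here
        PySem.List.min? free (fun uv => PySem.Dict.getD ranks uv 0)

-- ===== PRECONDITION & SPEC =====
def Spec_infer_uv_from_question_count_py (n_questions : Int) (existing_uvs : List String) (out : Option String) : Prop := out = infer_uv_from_question_count_py_alt n_questions existing_uvs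
instance (n_questions : Int) (existing_uvs : List String) (out : Option String) : Decidable (Spec_infer_uv_from_question_count_py n_questions existing_uvs out) := by unfold Spec_infer_uv_from_question_count_py; infer_instance

-- ===== CLAIM =====
def Claim_equal_infer_uv_from_question_count_py : Prop := ∀ (n_questions : Int) (existing_uvs : List String), Dom_infer_uv_from_question_count_py n_questions existing_uvs → Spec_infer_uv_from_question_count_py n_questions existing_uvs (infer_uv_from_question_count_py n_questions existing_uvs)

-- ===== LEMMAS AND PROOFS =====
-- Bracket arithmetic: which rank dict the closed-form index selects on each of A's ranges.
theorem pvIdx_high (n : Int) (h : 25 ≤ n ∧ n ≤ 35) :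
    min (PySem.Int.floordiv (n - 5) 10) 2 = 2 := by
  rw [PySem.Int.floordiv_eq_ediv_of_pos (by norm_num)]; omega

theorem pvIdx_mid (n : Int) (h : 15 ≤ n ∧ n ≤ 25) (h' : ¬ (25 ≤ n ∧ n ≤ 35)) :
    min (PySem.Int.floordiv (n - 5) 10) 2 = 1 := by
  rw [PySem.Int.floordiv_eq_ediv_of_pos (by norm_num)]; omega

theorem pvIdx_low (n : Int) (h : 5 ≤ n ∧ n ≤ 15) (h' : ¬ (15 ≤ n ∧ n ≤ 25)) :
    min (PySem.Int.floordiv (n - 5) 10) 2 = 0 := by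
  rw [PySem.Int.floordiv_eq_ediv_of_pos (by norm_num)]; omega

-- Per bracket: A's first-available loop equals B's min-by-rank over the filtered keys.
theorem pvBracket_high (ex : List String) :
    pvLoopA ["UVR", "UVC", "UVT"] ex =
      PySem.List.min?
        (((PySem.Dict.mk [("UVR", (0:Int)), ("UVC", 1), ("UVT", 2)]).keys).filter
          (fun uv => !ex.contains uv))
        (fun uv => PySem.Dict.getD (PySem.Dict.mk [("UVR", (0:Int)), ("UVC", 1), ("UVT", 2)]) uv 0) := by
  by_cases hR : "UVR" ∈ ex <;> by_cases hC : "UVC" ∈ ex <;> by_cases hT : "UVT" ∈ ex <;>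
    simp [pvLoopA, PySem.Dict.keys_mk, PySem.Dict.getD, PySem.Dict.get?_mk_cons,
      PySem.List.min?, hR, hC, hT]

theorem pvBracket_mid (ex : List String) :
    pvLoopA ["UVO", "UVR", "UVC"] ex =
      PySem.List.min?
        (((PySem.Dict.mk [("UVO", (0:Int)), ("UVR", 1), ("UVC", 2)]).keys).filter
          (fun uv => !ex.contains uv))
        (fun uv => PySem.Dict.getD (PySem.Dict.mk [("UVO", (0:Int)), ("UVR", 1), ("UVC", 2)]) uv 0) := by
  by_cases hO : "UVO" ∈ ex <;> by_cases hR : "UVR" ∈ ex <;> by_cases hC : "UVC" ∈ ex <;>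
    simp [pvLoopA, PySem.Dict.keys_mk, PySem.Dict.getD, PySem.Dict.get?_mk_cons,
      PySem.List.min?, hO, hR, hC]

theorem pvBracket_low (ex : List String) :
    pvLoopA ["UVR", "UVC", "UVO", "UVT"] ex =
      PySem.List.min?
        (((PySem.Dict.mk [("UVR", (0:Int)), ("UVC", 1), ("UVO", 2), ("UVT", 3)]).keys).filter
          (fun uv => !ex.contains uv))
        (fun uv => PySem.Dict.getD (PySem.Dict.mk [("UVR", (0:Int)), ("UVC", 1), ("UVO", 2), ("UVT", 3)]) uv 0) := by
  by_cases hR : "UVR" ∈ ex <;> by_cases hC : "UVC" ∈ ex <;> by_cases hO : "UVO" ∈ ex <;>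
    by_cases hT : "UVT" ∈ ex <;>
    simp [pvLoopA, PySem.Dict.keys_mk, PySem.Dict.getD, PySem.Dict.get?_mk_cons,
      PySem.List.min?, hR, hC, hO, hT]

-- pvRanks with the ofList folds evaluated to Dict constructors
theorem pvRanks_eq : pvRanks =
    [PySem.Dict.mk [("UVR", 0), ("UVC", 1), ("UVO", 2), ("UVT", 3)],
     PySem.Dict.mk [("UVO", 0), ("UVR", 1), ("UVC", 2)],
     PySem.Dict.mk [("UVR", 0), ("UVC", 1), ("UVT", 2)]] := by decide

-- ===== VERDICT =====
theorem infer_uv_from_question_count_py_spec : Claim_equal_infer_uv_from_question_count_py := by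
  intro n ex _
  unfold Spec_infer_uv_from_question_count_py infer_uv_from_question_count_py
    infer_uv_from_question_count_py_alt
  by_cases h1 : 25 ≤ n ∧ n ≤ 35
  · rw [if_pos h1, if_neg (by omega), pvIdx_high n h1, pvRanks_eq]
    simpa [PySem.List.pyGet?, PySem.List.pyIdx?] using pvBracket_high ex
  · by_cases h2 : 15 ≤ n ∧ n ≤ 25
    · rw [if_neg h1, if_pos h2, if_neg (by omega), pvIdx_mid n h2 h1, pvRanks_eq]
      simpa [PySem.List.pyGet?, PySem.List.pyIdx?] using pvBracket_mid ex
    · by_cases h3 : 5 ≤ n ∧ n ≤ 15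
      · rw [if_neg h1, if_neg h2, if_pos h3, if_neg (by omega), pvIdx_low n h3 h2, pvRanks_eq]
        simpa [PySem.List.pyGet?, PySem.List.pyIdx?] using pvBracket_low ex
      · rw [if_neg h1, if_neg h2, if_neg h3, if_pos (by omega)]
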